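-- pv_equiv track=rewrite | github.com/hecgon2022/EE461L-Absolute-Banger-Project | python/encryption.py | customEncrypt
-- ===== SOURCE A (Python) =====
-- def customEncrypt(inputText, n, d):
--   inputText = inputText[::-1] #reverses the string
--   for i in range(len(inputText)):
--     char = inputText[i]
--     if(ord(char) > 33 and ord(char) < 127):
--       shift = ord(char) + (n * d);
--       if(shift <= 33):
--         diff = 34 - shift
--         shift = 127 - diff
--         inputText = inputText[:i] + chr(shift) + inputText[i+1:]
--       elif(shift >= 127):
--         diff = shift - 126
--         shift = diff + 33
--         inputText = inputText[:i] + chr(shift) + inputText[i+1:]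
--       else:
--         inputText = inputText[:i] + chr(shift) + inputText[i+1:]
--     else:
--       inputText = inputText[:i] + char + inputText[i+1:]
--   return inputText
-- ===== SOURCE B (Python) =====
-- def _shift(c, k):
--     o = ord(c)
--     if 33 < o < 127:
--         s = o + k
--         if s <= 33:
--             s += 93
--         elif s >= 127:
--             s -= 93
--         return chr(s)
--     return c
--
--
-- def customEncrypt(inputText, n, d):
--     k = n * d
--     res = ''
--     for c in inputText:
--         res = _shift(c, k) + res
--     return res
-- ===== Notes on version B (the rewrite author's own statement) =====
-- stated objective: simpler
-- what changed: A reverses the string first and then loops over indices, rebuilding the whole string by slice-and-splice at every position; B never reverses or splices: it makes one forward pass over the original string and builds the output back-to-front by prepending each shifted character, with the shift arithmetic factored into a helper.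
import Mathlib
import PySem

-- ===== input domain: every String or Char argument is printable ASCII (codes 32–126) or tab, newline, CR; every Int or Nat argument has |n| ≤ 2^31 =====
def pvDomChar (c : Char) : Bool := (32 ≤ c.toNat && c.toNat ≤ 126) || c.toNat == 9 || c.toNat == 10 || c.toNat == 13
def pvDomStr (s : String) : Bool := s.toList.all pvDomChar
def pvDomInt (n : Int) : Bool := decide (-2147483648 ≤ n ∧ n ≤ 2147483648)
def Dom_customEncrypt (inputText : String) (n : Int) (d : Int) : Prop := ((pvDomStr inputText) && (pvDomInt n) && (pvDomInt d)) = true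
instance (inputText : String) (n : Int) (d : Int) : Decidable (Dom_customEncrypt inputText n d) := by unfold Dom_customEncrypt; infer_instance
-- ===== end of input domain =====

-- B drops A's reverse-then-splice index loop: one forward pass over the original string that
-- prepends each shifted character, building the result back-to-front (same return value as A).

-- chr(v): exact for codes that are valid non-surrogate codepoints (guaranteed by Pre_ below)
def pyChr (v : Int) : Char := Char.ofNat v.toNat

-- ===== PORT A =====
-- body of A's for-loop (one slice-and-splice replacement at index i), exactly as A writes it
def stepA (n d : Int) (s : List Char) (i : Int) : List Char :=
  let char := PySem.List.pyGetD s i ' '   -- i is always in range; default never used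
  if 33 < char.toNat && char.toNat < 127 then
    let shift : Int := (char.toNat : Int) + n * d
    if shift ≤ 33 then
      let diff := 34 - shift
      let shift := 127 - diff
      PySem.List.slice s none (some i) ++ [pyChr shift] ++ PySem.List.slice s (some (i + 1)) none
    else if 127 ≤ shift then
      let diff := shift - 126
      let shift := diff + 33
      PySem.List.slice s none (some i) ++ [pyChr shift] ++ PySem.List.slice s (some (i + 1)) none
    else
      PySem.List.slice s none (some i) ++ [pyChr shift] ++ PySem.List.slice s (some (i + 1)) none
  else
    PySem.List.slice s none (some i) ++ [char] ++ PySem.List.slice s (some (i + 1)) none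

def customEncrypt (inputText : String) (n : Int) (d : Int) : String :=
  -- inputText = inputText[::-1]
  let s0 := (PySem.List.slice? inputText.toList none none (-1)).getD []
  -- for i in range(len(inputText)):
  String.ofList ((PySem.List.pyRange 0 (s0.length : Int) 1).foldl (stepA n d) s0)

-- ===== PORT B =====
-- Source B's helper _shift, exactly as written
def shiftB (c : Char) (k : Int) : Char :=
  let o : Int := (c.toNat : Int)
  if 33 < o ∧ o < 127 then
    let s := o + k
    let s := if s ≤ 33 then s + 93 else if 127 ≤ s then s - 93 else s
    pyChr s
  else c

def customEncrypt_alt (inputText : String) (n : Int) (d : Int) : String :=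
  let k := n * d
  -- res = ''; for c in inputText: res = _shift(c, k) + res
  String.ofList (inputText.toList.foldl (fun res c => shiftB c k :: res) [])

-- ===== PRECONDITION & SPEC =====
-- A's single-step wrap, used only to state Pre_ (never by the ports).
def wrapCode (s : Int) : Int := if s ≤ 33 then s + 93 else if 127 ≤ s then s - 93 else s

-- Pre_ excludes exactly the inputs where chr(shift) raises in Python (code outside 0..0x10FFFF:
-- ValueError/OverflowError) and, slightly narrower, the inputs whose result would contain a lone
-- UTF-16 surrogate (code in 0xD800..0xDFFF), which Python returns but a Lean Char cannot represent.
def preOkChar (k : Int) (c : Char) : Bool :=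
  if 33 < c.toNat && c.toNat < 127 then
    decide ((0 ≤ wrapCode ((c.toNat : Int) + k) ∧ wrapCode ((c.toNat : Int) + k) < 55296) ∨
            (57343 < wrapCode ((c.toNat : Int) + k) ∧ wrapCode ((c.toNat : Int) + k) < 1114112))
  else true

def Pre_customEncrypt (inputText : String) (n : Int) (d : Int) : Prop :=
  inputText.toList.all (preOkChar (n * d)) = true
instance (inputText : String) (n : Int) (d : Int) : Decidable (Pre_customEncrypt inputText n d) := by
  unfold Pre_customEncrypt; infer_instance

def pvWitness_customEncrypt : String × Int × Int := ("ab!", 3, 2)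

def Spec_customEncrypt (inputText : String) (n : Int) (d : Int) (out : String) : Prop := out = customEncrypt_alt inputText n d
instance (inputText : String) (n : Int) (d : Int) (out : String) : Decidable (Spec_customEncrypt inputText n d out) := by unfold Spec_customEncrypt; infer_instance

-- ===== CLAIM (what is proved, stated in full; the proofs are below) =====
def Claim_equal_customEncrypt : Prop := ∀ (inputText : String) (n : Int) (d : Int), Dom_customEncrypt inputText n d → Pre_customEncrypt inputText n d → Spec_customEncrypt inputText n d (customEncrypt inputText n d)

-- ===== LEMMAS AND PROOFS =====

-- the per-character transformation both programs implement
def encG (k : Int) (c : Char) : Char :=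
  if 33 < c.toNat && c.toNat < 127 then pyChr (wrapCode ((c.toNat : Int) + k)) else c

-- one iteration of A's loop at index pre.length replaces the head of the suffix
theorem stepA_eq (n d : Int) (pre cs : List Char) (c : Char) :
    stepA n d (pre ++ c :: cs) (pre.length : Int) = (pre ++ [encG (n * d) c]) ++ cs := by
  have hchar : PySem.List.pyGetD (pre ++ c :: cs) (pre.length : Int) ' ' = c := by
    simp [PySem.List.pyGetD_natCast, List.getD_eq_getElem?_getD]
  have hsl1 : PySem.List.slice (pre ++ c :: cs) none (some (pre.length : Int)) = pre := by
    rw [PySem.List.slice_to_natCast]; simp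
  have hsl2 : PySem.List.slice (pre ++ c :: cs) (some ((pre.length : Int) + 1)) none = cs := by
    have hc : ((pre.length : Int) + 1) = ((pre.length + 1 : Nat) : Int) := by push_cast; ring
    have hsplit : pre ++ c :: cs = (pre ++ [c]) ++ cs := by simp
    have hl : (pre ++ [c]).length = pre.length + 1 := by simp
    rw [hc, PySem.List.slice_from_natCast, hsplit, ← hl, List.drop_left]
  have e1 : ∀ sh : Int, 127 - (34 - sh) = sh + 93 := fun sh => by ring
  have e2 : ∀ sh : Int, sh - 126 + 33 = sh - 93 := fun sh => by ring
  simp only [stepA, hchar, hsl1, hsl2, encG, wrapCode, e1, e2]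
  split_ifs <;> simp [List.append_assoc]

theorem loopA (n d : Int) : ∀ (suf pre : List Char),
    (PySem.List.pyRange (pre.length : Int) ((pre.length : Int) + (suf.length : Int)) 1).foldl
      (stepA n d) (pre ++ suf) = pre ++ suf.map (encG (n * d)) := by
  intro suf
  induction suf with
  | nil =>
      intro pre
      rw [PySem.List.pyRange_one_eq_nil (by simp)]
      simp
  | cons c cs ih =>
      intro pre
      have hlt : (pre.length : Int) < (pre.length : Int) + ((c :: cs).length : Int) := by
        simp only [List.length_cons]; push_cast; omega
      rw [PySem.List.pyRange_one_cons hlt, List.foldl_cons, stepA_eq n d pre cs c]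
      have h1 : ((pre ++ [encG (n * d) c]).length : Int) = (pre.length : Int) + 1 := by
        simp
      have h2 : ((pre.length : Int) + 1) + (cs.length : Int)
          = (pre.length : Int) + ((c :: cs).length : Int) := by
        simp; ring
      have := ih (pre ++ [encG (n * d) c])
      rw [h1, h2] at this
      rw [this]
      simp

theorem customEncrypt_eq_map (inputText : String) (n : Int) (d : Int) :
    customEncrypt inputText n d = String.ofList (inputText.toList.reverse.map (encG (n * d))) := by
  unfold customEncrypt
  rw [PySem.List.slice?_none_none_neg_one]
  simp only [Option.getD_some]
  have := loopA n d inputText.toList.reverse []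
  simp only [List.nil_append, List.length_nil, Int.natCast_zero, zero_add] at this
  rw [this]

-- B's helper computes encG
theorem shiftB_eq (k : Int) (c : Char) : shiftB c k = encG k c := by
  simp only [shiftB, encG, wrapCode]
  split_ifs <;>
    first
      | rfl
      | (exfalso; simp only [Bool.and_eq_true, decide_eq_true_eq, not_and, not_lt] at *; omega)

-- B's prepending fold builds the reversed map
theorem loopB (f : Char → Char) : ∀ (l acc : List Char),
    l.foldl (fun res c => f c :: res) acc = (l.map f).reverse ++ acc := by
  intro l
  induction l with
  | nil => intro acc; simp
  | cons c cs ih => intro acc; simp [ih]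

theorem customEncrypt_alt_eq_map (inputText : String) (n : Int) (d : Int) :
    customEncrypt_alt inputText n d = String.ofList (inputText.toList.reverse.map (encG (n * d))) := by
  unfold customEncrypt_alt
  simp only [loopB, List.append_nil]
  congr 1
  rw [← List.map_reverse]
  apply List.map_congr_left
  intro c _
  exact shiftB_eq (n * d) c

-- ===== VERDICT (by name: the statement is the Claim_ definition above) =====
theorem customEncrypt_spec : Claim_equal_customEncrypt := by
  intro s n d _ _
  unfold Spec_customEncrypt
  rw [customEncrypt_eq_map, customEncrypt_alt_eq_map]
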